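-- pv_equiv track=rewrite | github.com/AdeptLearner123/code-names-bot-processing-legacy | game/clue_generator.py | get_neg_scores
-- ===== SOURCE A (Python) =====
-- def get_neg_scores(neg_terms, term_scores):
--     neg_scores = {}
--     for term in neg_terms:
--         scores = term_scores[term]
--         for clue_option in scores:
--             if clue_option not in neg_scores:
--                 neg_scores[clue_option] = scores[clue_option]
--             else:
--                 neg_scores[clue_option] = max(neg_scores[clue_option], scores[clue_option])
--     return neg_scores
-- ===== SOURCE B (Python) =====
-- def get_neg_scores(neg_terms, term_scores):
--     table = {}
--     for term in neg_terms:
--         for clue_option, score in term_scores[term].items():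
--             table.setdefault(clue_option, []).append(score)
--     return {clue_option: max(scores) for clue_option, scores in table.items()}
-- ===== Notes on version B (the rewrite author's own statement) =====
-- stated objective: alternative
-- what changed: Instead of maintaining a running max per clue option, B first gathers every score of each clue option into a list keyed by clue option (one grouping pass), then builds the result by taking max over each gathered list (a separate reduce pass).
import Mathlib
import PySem

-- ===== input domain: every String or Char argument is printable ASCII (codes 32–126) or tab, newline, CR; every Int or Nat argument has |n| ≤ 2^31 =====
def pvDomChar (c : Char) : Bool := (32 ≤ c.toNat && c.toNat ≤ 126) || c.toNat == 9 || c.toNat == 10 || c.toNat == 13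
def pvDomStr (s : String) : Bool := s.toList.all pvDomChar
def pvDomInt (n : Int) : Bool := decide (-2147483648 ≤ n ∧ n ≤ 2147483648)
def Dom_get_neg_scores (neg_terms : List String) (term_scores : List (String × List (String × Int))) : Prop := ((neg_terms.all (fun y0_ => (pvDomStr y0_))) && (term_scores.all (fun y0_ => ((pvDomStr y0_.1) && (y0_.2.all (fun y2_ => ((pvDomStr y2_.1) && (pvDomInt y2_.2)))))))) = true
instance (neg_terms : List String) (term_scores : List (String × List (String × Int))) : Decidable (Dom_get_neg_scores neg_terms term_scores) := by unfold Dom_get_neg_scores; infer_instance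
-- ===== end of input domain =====

-- B restructures A's single running-max accumulation into gather-then-reduce: a grouping pass
-- collecting all scores per clue option, then a reduce pass taking max of each group (alternative, same cost).


-- ===== PORT A =====
-- 'for clue_option in scores' iterates the dict's keys, each exactly once with 'scores[clue_option]'
-- its value: ported as iterating the (key, value) pairs of the association list.
def get_neg_scores (neg_terms : List String) (term_scores : List (String × List (String × Int))) : List (String × Int) :=
  (neg_terms.foldl (fun neg_scores term =>
    match (PySem.Dict.mk term_scores).get? term with
    | none => neg_scores   -- Python raises KeyError here; excluded by Pre_
    | some scores =>
      scores.foldl (fun neg_scores p =>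
        match neg_scores.get? p.1 with
        | none => neg_scores.insert p.1 p.2
        | some old => neg_scores.insert p.1 (max old p.2)) neg_scores)
    PySem.Dict.empty).items

-- ===== PORT B =====
-- Python's max(scores) on a nonempty list of ints (first maximal element = plain max on Int).
def pvMaxList (l : List Int) : Int :=
  match l with
  | [] => 0
  | h :: t => t.foldl max h

def get_neg_scores_alt (neg_terms : List String) (term_scores : List (String × List (String × Int))) : List (String × Int) :=
  -- table.setdefault(clue_option, []).append(score)  ==  table[clue_option] = table.get(clue_option, []) + [score]
  let table : PySem.Dict String (List Int) :=
    neg_terms.foldl (fun table term =>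
      match (PySem.Dict.mk term_scores).get? term with
      | none => table   -- Python raises KeyError here; excluded by Pre_
      | some scores =>
        scores.foldl (fun table p => table.modify p.1 [] (· ++ [p.2])) table)
      PySem.Dict.empty
  table.items.map (fun kv => (kv.1, pvMaxList kv.2))

-- ===== PRECONDITION & SPEC =====
-- Pre_ excludes exactly the inputs on which Python A raises KeyError: a neg term absent from term_scores.
def Pre_get_neg_scores (neg_terms : List String) (term_scores : List (String × List (String × Int))) : Prop :=
  ∀ term ∈ neg_terms, term ∈ term_scores.map (·.1)
instance (neg_terms : List String) (term_scores : List (String × List (String × Int))) : Decidable (Pre_get_neg_scores neg_terms term_scores) := by unfold Pre_get_neg_scores; infer_instance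

def pvWitness_get_neg_scores : List String × (List (String × List (String × Int))) :=
  (["a", "b"], [("a", [("x", 1), ("y", 5)]), ("b", [("x", 3)])])

def Spec_get_neg_scores (neg_terms : List String) (term_scores : List (String × List (String × Int))) (out : List (String × Int)) : Prop := out = get_neg_scores_alt neg_terms term_scores
instance (neg_terms : List String) (term_scores : List (String × List (String × Int))) (out : List (String × Int)) : Decidable (Spec_get_neg_scores neg_terms term_scores out) := by unfold Spec_get_neg_scores; infer_instance

-- ===== CLAIM (what is proved, stated in full; the proofs are below) =====
def Claim_equal_get_neg_scores : Prop := ∀ (neg_terms : List String) (term_scores : List (String × List (String × Int))), Dom_get_neg_scores neg_terms term_scores → Pre_get_neg_scores neg_terms term_scores → Spec_get_neg_scores neg_terms term_scores (get_neg_scores neg_terms term_scores)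

-- ===== LEMMAS AND PROOFS =====

-- the value-wise reduction that relates B's table to A's accumulator
def pvF : String × List Int → String × Int := fun kv => (kv.1, pvMaxList kv.2)

theorem pvMaxList_append (l : List Int) (h : l ≠ []) (v : Int) :
    pvMaxList (l ++ [v]) = max (pvMaxList l) v := by
  cases l with
  | nil => exact absurd rfl h
  | cons x xs => simp [pvMaxList, List.foldl_append]

theorem pv_get?_map (t : PySem.Dict String (List Int)) (k : String) :
    (PySem.Dict.mk (t.items.map pvF)).get? k = (t.get? k).map pvMaxList := by
  simp [PySem.Dict.get?, List.find?_map, Function.comp_def, pvF, Option.map_map]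

theorem pv_step (t : PySem.Dict String (List Int)) (p : String × Int)
    (hne : ∀ kv ∈ t.items, kv.2 ≠ []) :
    (match (PySem.Dict.mk (t.items.map pvF)).get? p.1 with
      | none => (PySem.Dict.mk (t.items.map pvF)).insert p.1 p.2
      | some old => (PySem.Dict.mk (t.items.map pvF)).insert p.1 (max old p.2))
      = PySem.Dict.mk ((t.modify p.1 [] (· ++ [p.2])).items.map pvF)
    ∧ ∀ kv ∈ (t.modify p.1 [] (· ++ [p.2])).items, kv.2 ≠ [] := by
  have hget := pv_get?_map t p.1
  have hcont : (PySem.Dict.mk (t.items.map pvF)).contains p.1 = t.contains p.1 := by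
    rw [PySem.Dict.contains_eq_isSome_get?, PySem.Dict.contains_eq_isSome_get?, hget]
    cases t.get? p.1 <;> rfl
  cases hg : t.get? p.1 with
  | none =>
    have hc : t.contains p.1 = false := by
      rw [PySem.Dict.contains_eq_isSome_get?, hg]; rfl
    have hd : t.getD p.1 [] = [] := by
      rw [PySem.Dict.getD_eq_get?_getD, hg]; rfl
    constructor
    · rw [hget, hg]
      simp only [Option.map_none]
      unfold PySem.Dict.modify
      rw [PySem.Dict.items_insert_of_not_contains _ _ hc, hd]
      unfold PySem.Dict.insert
      rw [hcont, hc]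
      simp [pvF, pvMaxList]
    · intro kv hkv
      unfold PySem.Dict.modify at hkv
      rw [PySem.Dict.items_insert_of_not_contains _ _ hc, hd] at hkv
      rcases List.mem_append.mp hkv with h | h
      · exact hne kv h
      · simp at h; simp [h]
  | some l =>
    have hl : l ≠ [] := by
      have := PySem.Dict.mem_items_of_get?_eq_some t hg
      exact hne _ this
    have hc : t.contains p.1 = true := by
      rw [PySem.Dict.contains_eq_isSome_get?, hg]; rfl
    have hd : t.getD p.1 [] = l := by
      rw [PySem.Dict.getD_eq_get?_getD, hg]; rfl
    constructor
    · rw [hget, hg]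
      simp only [Option.map_some]
      unfold PySem.Dict.modify
      rw [PySem.Dict.items_insert_of_contains, hd]
      · unfold PySem.Dict.insert
        rw [hcont, hc]
        simp only [if_true]
        congr 1
        rw [List.map_map, List.map_map]
        apply List.map_congr_left
        intro kv _
        by_cases hk : kv.1 = p.1
        · simp [pvF, hk, pvMaxList_append l hl]
        · simp [pvF, hk]
      · exact hc
    · intro kv hkv
      unfold PySem.Dict.modify at hkv
      rw [PySem.Dict.items_insert_of_contains _ _ hc, hd] at hkv
      rcases List.mem_map.mp hkv with ⟨q, hq, hqe⟩
      by_cases hk : q.1 = p.1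
      · simp [hk] at hqe; subst hqe; simp
      · simp [hk] at hqe; subst hqe; exact hne q hq

theorem pv_inner (scores : List (String × Int)) (t : PySem.Dict String (List Int))
    (hne : ∀ kv ∈ t.items, kv.2 ≠ []) :
    scores.foldl (fun neg_scores p =>
        match neg_scores.get? p.1 with
        | none => neg_scores.insert p.1 p.2
        | some old => neg_scores.insert p.1 (max old p.2)) (PySem.Dict.mk (t.items.map pvF))
      = PySem.Dict.mk ((scores.foldl (fun table p => table.modify p.1 [] (· ++ [p.2])) t).items.map pvF)
    ∧ ∀ kv ∈ (scores.foldl (fun table p => table.modify p.1 [] (· ++ [p.2])) t).items, kv.2 ≠ [] := by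
  induction scores generalizing t with
  | nil => exact ⟨rfl, hne⟩
  | cons p rest ih =>
    obtain ⟨hstep, hne'⟩ := pv_step t p hne
    obtain ⟨h1, h2⟩ := ih (t.modify p.1 [] (· ++ [p.2])) hne'
    refine ⟨?_, h2⟩
    simp only [List.foldl_cons]
    rw [hstep] at *
    exact h1

theorem pv_outer (terms : List String) (term_scores : List (String × List (String × Int)))
    (t : PySem.Dict String (List Int)) (hne : ∀ kv ∈ t.items, kv.2 ≠ []) :
    terms.foldl (fun neg_scores term =>
      match (PySem.Dict.mk term_scores).get? term with
      | none => neg_scores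
      | some scores =>
        scores.foldl (fun neg_scores p =>
          match neg_scores.get? p.1 with
          | none => neg_scores.insert p.1 p.2
          | some old => neg_scores.insert p.1 (max old p.2)) neg_scores) (PySem.Dict.mk (t.items.map pvF))
    = PySem.Dict.mk ((terms.foldl (fun table term =>
        match (PySem.Dict.mk term_scores).get? term with
        | none => table
        | some scores => scores.foldl (fun table p => table.modify p.1 [] (· ++ [p.2])) table) t).items.map pvF) := by
  induction terms generalizing t with
  | nil => rfl
  | cons term rest ih =>
    simp only [List.foldl_cons]
    cases hg : (PySem.Dict.mk term_scores).get? term with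
    | none => exact ih t hne
    | some scores =>
      obtain ⟨h1, h2⟩ := pv_inner scores t hne
      have hrec := ih _ h2
      rw [← h1] at hrec
      exact hrec

-- ===== VERDICT (by name: the statement is the Claim_ definition above) =====
theorem get_neg_scores_spec : Claim_equal_get_neg_scores := by
  intro neg_terms term_scores _ _
  unfold Spec_get_neg_scores get_neg_scores get_neg_scores_alt
  have h := pv_outer neg_terms term_scores PySem.Dict.empty (by intro kv hkv; cases hkv)
  have he : (PySem.Dict.empty : PySem.Dict String Int)
      = PySem.Dict.mk (((PySem.Dict.empty : PySem.Dict String (List Int)).items).map pvF) := rfl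
  rw [he, h]
  simp [pvF]
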